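-- pv_equiv track=rewrite | github.com/daizhenli94/read-resume-into-html | make_website.py | project_detection
-- ===== SOURCE A (Python) =====
-- def project_detection(resume):
-- 	'''looks for the word Project in the resume
-- 	'''
--
-- 	#declare an empty list project
-- 	project = []
-- 	#iterate through the resume to find the line with project
-- 	for i in range(len(resume)):
-- 		if 'Project' in resume[0]:
-- 			#break after that line is found
-- 			break
-- 		#remove all the provious lines in resume
-- 		resume.remove(resume[0])
--
-- 	#iterate again through the remaining of resume
-- 	for line in resume:
-- 		#append the elements into the project
-- 		project.append(line.strip('\n'))
-- 		#if that line is an empty line remove that line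
-- 		if '' in project:
-- 			project.remove('')
-- 		#if at least 10 minus signs are met, stop appending to line
-- 		if '----------' in line:
-- 			break
-- 	#return the list of projects
-- 	return project
-- ===== SOURCE B (Python) =====
-- def project_detection(resume):
--     # Single linear scan (no repeated list.remove): find first 'Project' line,
--     # then collect non-empty (after stripping newlines) lines up to and
--     # including the first line with at least 10 dashes.
--     # NOTE: unlike A, B does not mutate the caller's list; return value is identical.
--     k = None
--     for i, line in enumerate(resume):
--         if 'Project' in line:
--             k = i
--             break
--     if k is None:
--         return []
--     out = []
--     for line in resume[k:]:
--         s = line.strip('\n')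
--         if s:
--             out.append(s)
--         if '----------' in line:
--             break
--     return out
-- ===== Notes on version B (the rewrite author's own statement) =====
-- stated objective: faster
-- what changed: B replaces A's quadratic delete-the-head loop (list.remove on every leading line) and append-then-remove('') accumulator juggling with a single linear scan: find the first 'Project' line index, then collect non-empty stripped lines until the dashes line; B does not mutate the input list (return value identical).
import Mathlib
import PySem

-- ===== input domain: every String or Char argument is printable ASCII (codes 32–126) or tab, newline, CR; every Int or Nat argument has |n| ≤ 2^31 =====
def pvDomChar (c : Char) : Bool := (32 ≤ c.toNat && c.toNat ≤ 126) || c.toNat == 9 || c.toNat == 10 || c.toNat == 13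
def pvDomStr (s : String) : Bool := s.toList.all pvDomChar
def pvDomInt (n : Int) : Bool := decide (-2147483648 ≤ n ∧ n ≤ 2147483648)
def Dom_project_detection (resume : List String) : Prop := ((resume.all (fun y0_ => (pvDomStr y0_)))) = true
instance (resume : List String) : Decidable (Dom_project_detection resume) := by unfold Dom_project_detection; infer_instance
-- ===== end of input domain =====

-- B replaces A's quadratic delete-the-head loop with one linear scan (find first 'Project'
-- index, then collect non-empty stripped lines until the dashes line); A mutates its
-- argument in place, B does not — the equivalence proved here is about the RETURN value.

-- ===== PORT A =====
-- first loop: 'for i in range(len(resume)): if "Project" in resume[0]: break; resume.remove(resume[0])'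
-- (resume[0] never raises in Python: each non-breaking iteration removes one element and the
-- iteration count is the initial length, so the [] branch below is unreachable)
def pvLoopA : Nat → List String → List String
  | 0, r => r
  | _ + 1, [] => []
  | n + 1, h :: t =>
    if PySem.Str.isIn "Project" h then h :: t
    else pvLoopA n ((PySem.List.remove? (h :: t) h).getD (h :: t))

-- second loop: append line.strip('\n'); remove the first '' if present; break on the dashes line
def pvLoopB : List String → List String → List String
  | project, [] => project
  | project, line :: rest =>
    let p1 := project ++ [PySem.Str.stripChars line "\n"]
    let p2 := if "" ∈ p1 then (PySem.List.remove? p1 "").getD p1 else p1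
    if PySem.Str.isIn "----------" line then p2 else pvLoopB p2 rest

def project_detection (resume : List String) : List String :=
  pvLoopB [] (pvLoopA resume.length resume)

-- ===== PORT B =====
-- 'for i, line in enumerate(resume): if "Project" in line: k = i; break'
def pvFindProj : List String → Option Nat
  | [] => none
  | h :: t => if PySem.Str.isIn "Project" h then some 0 else (pvFindProj t).map (· + 1)

-- 'for line in resume[k:]: s = line.strip("\n"); if s: out.append(s); if "----------" in line: break'
def pvCollect : List String → List String
  | [] => []
  | line :: rest =>
    let s := PySem.Str.stripChars line "\n"
    (if s ≠ "" then [s] else []) ++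
      (if PySem.Str.isIn "----------" line then [] else pvCollect rest)

def project_detection_alt (resume : List String) : List String :=
  match pvFindProj resume with
  | none => []
  | some k => pvCollect (resume.drop k)

-- ===== PRECONDITION & SPEC =====
def Spec_project_detection (resume : List String) (out : List String) : Prop := out = project_detection_alt resume
instance (resume : List String) (out : List String) : Decidable (Spec_project_detection resume out) := by unfold Spec_project_detection; infer_instance

-- ===== CLAIM (what is proved, stated in full; the proofs are below) =====
def Claim_equal_project_detection : Prop := ∀ (resume : List String), Dom_project_detection resume → Spec_project_detection resume (project_detection resume)

-- ===== LEMMAS AND PROOFS =====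

-- A's first loop = drop everything before the first 'Project' line ([] if there is none)
theorem pvLoopA_eq (r : List String) :
    pvLoopA r.length r = (match pvFindProj r with | none => [] | some k => r.drop k) := by
  induction r with
  | nil => simp [pvLoopA, pvFindProj]
  | cons h t ih =>
    by_cases hp : PySem.Str.isIn "Project" h
    · simp only [List.length_cons, pvLoopA, pvFindProj, hp, if_true]
      simp
    · simp only [List.length_cons, pvLoopA, pvFindProj, hp,
        PySem.List.remove?_cons_self, Option.getD_some, ih]
      cases pvFindProj t <;> simp

-- A's second loop with an ''-free accumulator = accumulator ++ B's collect
theorem pvLoopB_eq (rest : List String) :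
    ∀ acc : List String, "" ∉ acc → pvLoopB acc rest = acc ++ pvCollect rest := by
  induction rest with
  | nil => intro acc _; simp [pvLoopB, pvCollect]
  | cons line rest ih =>
    intro acc hacc
    by_cases hs : PySem.Str.stripChars line "\n" = ""
    · have hrem : (PySem.List.remove? (acc ++ [("" : String)]) "").getD (acc ++ [""]) = acc := by
        rw [PySem.List.remove?_eq_some_erase (acc ++ [""]) "" (by simp)]
        rw [List.erase_append_right _ hacc]; simp
      by_cases hd : PySem.Str.isIn "----------" line
      · simp only [pvLoopB, pvCollect, hs, hd, if_true, List.mem_append, hacc,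
          List.mem_singleton, or_true, hrem]
        simp
      · simp only [pvLoopB, pvCollect, hs, hd, List.mem_append, hacc,
          List.mem_singleton, false_or, hrem]
        simp only [ne_eq, not_true_eq_false, if_false, List.nil_append]
        exact ih acc hacc
    · have hmem : ("" : String) ∉ acc ++ [PySem.Str.stripChars line "\n"] := by
        simp only [List.mem_append, List.mem_singleton]
        exact fun h => h.elim hacc (fun h' => hs h'.symm)
      by_cases hd : PySem.Str.isIn "----------" line
      · simp only [pvLoopB, pvCollect, hs, hd, if_true, hmem, ite_false, ne_eq,
          not_false_eq_true]
        simp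
      · simp only [pvLoopB, pvCollect, hs, hd, if_false, hmem, ne_eq,
          not_false_eq_true, if_true]
        rw [ih _ hmem]
        simp

-- ===== VERDICT (by name: the statement is the Claim_ definition above) =====
theorem project_detection_spec : Claim_equal_project_detection := by
  intro resume _
  show project_detection resume = project_detection_alt resume
  unfold project_detection project_detection_alt
  rw [pvLoopA_eq]
  cases h : pvFindProj resume with
  | none => simp [pvLoopB]
  | some k => simpa using pvLoopB_eq (resume.drop k) [] (by simp)
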